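-- pv_equiv track=rewrite | github.com/vinleclair/advent-of-code-2018 | Day_6/day_6.py | part_1
-- ===== SOURCE A (Python) =====
-- from collections import defaultdict
--
-- def part_1(coordinates, x_min, x_max, y_min, y_max):
--     counts = defaultdict(int)
--     infinite = set()
--
--     for y in range(y_min, y_max + 1):
--         for x in range(x_min, x_max + 1):
--             distance = sorted((manhattan_distance(x, px, y, py), point_index) for point_index, (px, py) in enumerate(coordinates))
--             if distance[0][0] != distance[1][0]:
--                 counts[distance[0][1]] += 1
--                 if x == x_min or x == x_max or y == y_min or y == y_max:
--                     infinite.add(distance[0][1])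
--     for k in infinite:
--         counts.pop(k)
--     return counts
--
-- def manhattan_distance(x1, x2, y1, y2):
--     return abs(x2 - x1) + abs(y2 - y1)
-- ===== SOURCE B (Python) =====
-- from collections import Counter
--
-- def _nearest(coordinates, x, y):
--     # index of the unique nearest coordinate, or None on a tie
--     ds = [abs(px - x) + abs(py - y) for px, py in coordinates]
--     m = min(ds)
--     return ds.index(m) if ds.count(m) == 1 else None
--
-- def part_1(coordinates, x_min, x_max, y_min, y_max):
--     # Staged passes: compute each cell's owner once, then tally with a Counter,
--     # collect boundary owners as the infinite set, and filter them out at the end.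
--     owners = [(x, y, _nearest(coordinates, x, y))
--               for y in range(y_min, y_max + 1)
--               for x in range(x_min, x_max + 1)]
--     counts = Counter(o for _, _, o in owners if o is not None)
--     infinite = {o for x, y, o in owners
--                 if o is not None and (x == x_min or x == x_max or y == y_min or y == y_max)}
--     return {k: v for k, v in counts.items() if k not in infinite}
-- ===== Notes on version B (the rewrite author's own statement) =====
-- stated objective: alternative
-- what changed: A interleaves everything in one grid loop (per-cell sort of (distance,index) tuples, mutating the counts dict and infinite set together); B works in staged passes: it computes each cell's unique-nearest owner once by a min/count/index scan into an owner list, tallies it with a Counter, builds the boundary-owner set, and filters those keys out at the end.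
import Mathlib
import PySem

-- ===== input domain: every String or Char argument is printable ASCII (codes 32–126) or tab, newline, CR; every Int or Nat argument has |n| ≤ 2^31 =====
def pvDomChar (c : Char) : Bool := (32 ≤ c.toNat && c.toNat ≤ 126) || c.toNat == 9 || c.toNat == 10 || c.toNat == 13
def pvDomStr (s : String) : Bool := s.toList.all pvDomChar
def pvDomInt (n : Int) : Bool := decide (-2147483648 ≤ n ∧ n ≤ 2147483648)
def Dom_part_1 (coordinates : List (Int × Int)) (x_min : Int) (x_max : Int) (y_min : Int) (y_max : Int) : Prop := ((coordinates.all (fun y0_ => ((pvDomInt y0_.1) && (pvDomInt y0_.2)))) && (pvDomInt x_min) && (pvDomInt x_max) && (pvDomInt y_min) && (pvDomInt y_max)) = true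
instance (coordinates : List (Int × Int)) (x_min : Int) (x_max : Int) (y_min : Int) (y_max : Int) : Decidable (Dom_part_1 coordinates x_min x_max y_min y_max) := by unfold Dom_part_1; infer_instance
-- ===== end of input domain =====

-- B replaces A's single interleaved grid loop (sort per cell, dict+set mutated together) by
-- staged passes: an owner list, a Counter, a boundary-owner set, then a final filter
-- (objective: alternative — no per-cell sort and a different decomposition; same cost).

-- ===== PORT A =====
def manhattan_distance (x1 : Int) (x2 : Int) (y1 : Int) (y2 : Int) : Int :=
  |x2 - x1| + |y2 - y1|

-- body of A's inner loop for one grid cell (x, y); state = (counts, infinite)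
def part1Cell (coordinates : List (Int × Int)) (x_min : Int) (x_max : Int) (y_min : Int)
    (y_max : Int) (x : Int) (y : Int) (s : PySem.Dict Int Int × PySem.Set Int) :
    PySem.Dict Int Int × PySem.Set Int :=
  let distance := PySem.List.sorted2
    ((PySem.List.enumerate coordinates).map (fun q => (manhattan_distance x q.2.1 y q.2.2, q.1)))
    Prod.fst Prod.snd
  match distance with
  | d0 :: d1 :: _ =>
      if d0.1 ≠ d1.1 then
        let counts := s.1.modify d0.2 0 (· + 1)
        let infinite :=
          if x = x_min ∨ x = x_max ∨ y = y_min ∨ y = y_max then PySem.Set.add s.2 d0.2 else s.2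
        (counts, infinite)
      else s
  | _ => s      -- distance[1] would raise IndexError here; excluded by Pre_part_1

def part_1 (coordinates : List (Int × Int)) (x_min : Int) (x_max : Int) (y_min : Int) (y_max : Int) : List (Int × Int) :=
  let st := (PySem.List.pyRange y_min (y_max + 1) 1).foldl
    (fun s yy => (PySem.List.pyRange x_min (x_max + 1) 1).foldl
      (fun s' xx => part1Cell coordinates x_min x_max y_min y_max xx yy s') s)
    (PySem.Dict.empty, PySem.Set.empty)
  (st.2.foldl (fun d k => PySem.Dict.erase d k) st.1).items

-- ===== PORT B =====
-- _nearest: index of the unique nearest coordinate, or None on a tie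
def nearestPt (coordinates : List (Int × Int)) (x : Int) (y : Int) : Option Int :=
  let ds := coordinates.map (fun p => |p.1 - x| + |p.2 - y|)
  match PySem.List.min? ds (fun v => v) with
  | some m =>
      if PySem.List.count ds m = 1 then (PySem.List.index? ds m).map (fun i => (i : Int))
      else none
  | none => none      -- min([]) would raise ValueError; excluded by Pre_part_1

-- the condition of B's set comprehension, as a single Option-valued selector
def boundaryOwner (x_min : Int) (x_max : Int) (y_min : Int) (y_max : Int)
    (t : Int × Int × Option Int) : Option Int :=
  match t.2.2 with
  | some o => if t.1 = x_min ∨ t.1 = x_max ∨ t.2.1 = y_min ∨ t.2.1 = y_max then some o else none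
  | none => none

def part_1_alt (coordinates : List (Int × Int)) (x_min : Int) (x_max : Int) (y_min : Int) (y_max : Int) : List (Int × Int) :=
  let owners := (PySem.List.pyRange y_min (y_max + 1) 1).flatMap (fun yy =>
    (PySem.List.pyRange x_min (x_max + 1) 1).map (fun xx => (xx, yy, nearestPt coordinates xx yy)))
  let counts := PySem.Dict.counter (owners.filterMap (fun t => t.2.2))
  let infinite : PySem.Set Int :=
    PySem.Set.ofList (owners.filterMap (boundaryOwner x_min x_max y_min y_max))
  counts.items.filter (fun kv => !(PySem.Set.contains infinite kv.1))

-- ===== PRECONDITION & SPEC =====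
-- A evaluates distance[1] at every grid cell, so with a nonempty grid it raises IndexError
-- unless there are at least two coordinates; Pre_ admits exactly the inputs where A returns.
def Pre_part_1 (coordinates : List (Int × Int)) (x_min : Int) (x_max : Int) (y_min : Int) (y_max : Int) : Prop :=
  2 ≤ coordinates.length ∨ x_max < x_min ∨ y_max < y_min
instance (coordinates : List (Int × Int)) (x_min : Int) (x_max : Int) (y_min : Int) (y_max : Int) : Decidable (Pre_part_1 coordinates x_min x_max y_min y_max) := by unfold Pre_part_1; infer_instance

def pvWitness_part_1 : (List (Int × Int)) × Int × Int × Int × Int :=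
  ([(1, 1), (3, 2)], 0, 4, 0, 3)

def Spec_part_1 (coordinates : List (Int × Int)) (x_min : Int) (x_max : Int) (y_min : Int) (y_max : Int) (out : List (Int × Int)) : Prop := out = part_1_alt coordinates x_min x_max y_min y_max
instance (coordinates : List (Int × Int)) (x_min : Int) (x_max : Int) (y_min : Int) (y_max : Int) (out : List (Int × Int)) : Decidable (Spec_part_1 coordinates x_min x_max y_min y_max out) := by unfold Spec_part_1; infer_instance

-- ===== CLAIM (what is proved, stated in full; the proofs are below) =====
def Claim_equal_part_1 : Prop := ∀ (coordinates : List (Int × Int)) (x_min : Int) (x_max : Int) (y_min : Int) (y_max : Int), Dom_part_1 coordinates x_min x_max y_min y_max → Pre_part_1 coordinates x_min x_max y_min y_max → Spec_part_1 coordinates x_min x_max y_min y_max (part_1 coordinates x_min x_max y_min y_max)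

-- ===== LEMMAS AND PROOFS =====

-- A's per-cell state update, expressed as a function of the cell's owner (proof-only helper)
def ownStep (x_min : Int) (x_max : Int) (y_min : Int) (y_max : Int)
    (s : PySem.Dict Int Int × PySem.Set Int) (t : Int × Int × Option Int) :
    PySem.Dict Int Int × PySem.Set Int :=
  match t.2.2 with
  | some i => (s.1.modify i 0 (· + 1),
      if t.1 = x_min ∨ t.1 = x_max ∨ t.2.1 = y_min ∨ t.2.1 = y_max then PySem.Set.add s.2 i
      else s.2)
  | none => s

def LexLe (a b : Int × Int) : Prop := a.1 < b.1 ∨ (a.1 = b.1 ∧ a.2 ≤ b.2)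
def lexBf (a b : Int × Int) : Bool :=
  decide (a.1 < b.1) || (!decide (b.1 < a.1) && decide (a.2 < b.2))

lemma lexBf_true {a b : Int × Int} (h : lexBf a b = true) : LexLe a b := by
  simp [lexBf] at h; unfold LexLe; omega
lemma lexBf_false {a b : Int × Int} (h : lexBf a b = false) : LexLe b a := by
  simp [lexBf] at h; unfold LexLe; omega
lemma lexLe_trans {a b c : Int × Int} (h1 : LexLe a b) (h2 : LexLe b c) : LexLe a c := by
  unfold LexLe at *; omega

lemma insertBy_lex_pairwise (a : Int × Int) (xs : List (Int × Int))
    (h : xs.Pairwise LexLe) : (PySem.List.insertBy lexBf a xs).Pairwise LexLe := by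
  induction xs with
  | nil => simp [PySem.List.insertBy]
  | cons y ys ih =>
    rw [List.pairwise_cons] at h
    obtain ⟨hy, hys⟩ := h
    by_cases hb : lexBf a y = true
    · rw [show PySem.List.insertBy lexBf a (y :: ys) = a :: y :: ys by
        simp [PySem.List.insertBy, hb]]
      refine List.pairwise_cons.mpr ⟨?_, List.pairwise_cons.mpr ⟨hy, hys⟩⟩
      intro z hz
      rcases List.mem_cons.mp hz with rfl | hz
      · exact lexBf_true hb
      · exact lexLe_trans (lexBf_true hb) (hy z hz)
    · rw [show PySem.List.insertBy lexBf a (y :: ys) = y :: PySem.List.insertBy lexBf a ys by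
        simp [PySem.List.insertBy, hb]]
      refine List.pairwise_cons.mpr ⟨?_, ih hys⟩
      intro z hz
      rcases (PySem.List.mem_insertBy lexBf a z ys).mp hz with rfl | hz
      · exact lexBf_false (by simpa using hb)
      · exact hy z hz

lemma foldl_insertBy_pairwise (l : List (Int × Int)) (acc : List (Int × Int))
    (h : acc.Pairwise LexLe) :
    (l.foldl (fun acc x => PySem.List.insertBy lexBf x acc) acc).Pairwise LexLe := by
  induction l generalizing acc with
  | nil => simpa using h
  | cons x xs ih => exact ih _ (insertBy_lex_pairwise x acc h)

lemma sorted2_lex_pairwise (l : List (Int × Int)) :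
    (PySem.List.sorted2 l Prod.fst Prod.snd).Pairwise LexLe := by
  have h : PySem.List.sorted2 l Prod.fst Prod.snd
      = l.foldl (fun acc x => PySem.List.insertBy lexBf x acc) [] := rfl
  rw [h]
  exact foldl_insertBy_pairwise l [] (by simp)

lemma cell_eq (coordinates : List (Int × Int)) (hlen : 2 ≤ coordinates.length)
    (x_min x_max y_min y_max x y : Int) (s : PySem.Dict Int Int × PySem.Set Int) :
    part1Cell coordinates x_min x_max y_min y_max x y s
      = ownStep x_min x_max y_min y_max s (x, y, nearestPt coordinates x y) := by
  simp only [part1Cell, nearestPt]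
  set ds : List Int := coordinates.map (fun p => |p.1 - x| + |p.2 - y|) with hds
  set pairs : List (Int × Int) := (PySem.List.enumerate coordinates).map
    (fun q => (manhattan_distance x q.2.1 y q.2.2, q.1)) with hpairs
  have hfst : pairs.map Prod.fst = ds := by
    rw [hpairs, List.map_map]
    have h1 : (Prod.fst ∘ fun q : Int × Int × Int => (manhattan_distance x q.2.1 y q.2.2, q.1))
        = (fun p : Int × Int => |p.1 - x| + |p.2 - y|) ∘ (fun q : Int × Int × Int => q.2) := by
      funext q; simp [manhattan_distance]
    rw [h1, ← List.map_map, PySem.List.map_snd_enumerate]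
  have hlenp : pairs.length = coordinates.length := by
    simp [hpairs, PySem.List.length_enumerate]
  have hlds : ds.length = coordinates.length := by simp [hds]
  have hget : ∀ (k : Nat) (hk : k < coordinates.length),
      pairs[k]'(by omega) = (ds[k]'(by omega), (k : Int)) := by
    intro k hk
    simp [hpairs, hds, PySem.List.getElem_enumerate, manhattan_distance]
  -- the sorted list
  have hperm : (PySem.List.sorted2 pairs Prod.fst Prod.snd).Perm pairs :=
    PySem.List.sorted2_perm pairs Prod.fst Prod.snd false
  have hpw := sorted2_lex_pairwise pairs
  have hlsrt : (PySem.List.sorted2 pairs Prod.fst Prod.snd).length = coordinates.length := by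
    rw [hperm.length_eq, hlenp]
  obtain ⟨p0, p1, rest, hsrt⟩ : ∃ p0 p1 rest,
      PySem.List.sorted2 pairs Prod.fst Prod.snd = p0 :: p1 :: rest := by
    rcases h : PySem.List.sorted2 pairs Prod.fst Prod.snd with _ | ⟨a, _ | ⟨b, t⟩⟩
    · rw [h] at hlsrt; simp at hlsrt; omega
    · rw [h] at hlsrt; simp at hlsrt; omega
    · exact ⟨a, b, t, rfl⟩
  rw [hsrt] at hperm hpw
  -- min exists
  have hdsne : ds ≠ [] := by
    intro h; rw [h] at hlds; simp at hlds; omega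
  obtain ⟨m, hm⟩ : ∃ m, PySem.List.min? ds (fun v => v) = some m := by
    rcases h : PySem.List.min? ds (fun v => v) with _ | m
    · exact absurd ((PySem.List.min?_eq_none_iff ds _).mp h) hdsne
    · exact ⟨m, rfl⟩
  have hmmem : m ∈ ds := PySem.List.min?_mem hm
  have hmmin : ∀ v ∈ ds, m ≤ v := by
    have := PySem.List.min?_isMin (key := fun v => v) hm
    simpa using this
  -- p0 is lex-minimal: every element of pairs is p0 or LexLe-above p0
  have hp0min : ∀ q ∈ pairs, q = p0 ∨ LexLe p0 q := by
    intro q hq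
    have : q ∈ p0 :: p1 :: rest := hperm.mem_iff.mpr hq
    rcases List.mem_cons.mp this with rfl | hq'
    · exact Or.inl rfl
    · exact Or.inr ((List.pairwise_cons.mp hpw).1 q hq')
  have hp0pairs : p0 ∈ pairs := hperm.mem_iff.mp (by simp)
  have hp0fst : p0.1 = m := by
    have h1 : m ≤ p0.1 := hmmin p0.1 (by rw [← hfst]; exact List.mem_map_of_mem hp0pairs)
    obtain ⟨q, hqmem, hqfst⟩ : ∃ q ∈ pairs, q.1 = m := by
      rw [← hfst] at hmmem
      obtain ⟨q, hq1, hq2⟩ := List.mem_map.mp hmmem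
      exact ⟨q, hq1, hq2⟩
    rcases hp0min q hqmem with rfl | hle
    · omega
    · unfold LexLe at hle; omega
  -- count as countP over pairs / over sorted list
  have hcount : PySem.List.count ds m = List.countP (fun q => q.1 == m) (p0 :: p1 :: rest) := by
    rw [PySem.List.count_eq, ← hfst, List.count, List.countP_map,
      (hperm.countP_eq (fun q => q.1 == m))]
    rfl
  have hcountp : PySem.List.count ds m = List.countP (fun q => q.1 == m) pairs := by
    rw [PySem.List.count_eq, ← hfst, List.count, List.countP_map]; rfl
  rw [hsrt, hm]
  dsimp only
  by_cases hne : p0.1 ≠ p1.1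
  · -- unique minimum
    have hp1 : LexLe p0 p1 := (List.pairwise_cons.mp hpw).1 p1 (by simp)
    have hmlt : m < p1.1 := by unfold LexLe at hp1; omega
    have hrest : ∀ z ∈ rest, m < z.1 := by
      intro z hz
      have h1 : LexLe p1 z := (List.pairwise_cons.mp (List.pairwise_cons.mp hpw).2).1 z hz
      unfold LexLe at h1; omega
    have hcnt1 : PySem.List.count ds m = 1 := by
      rw [hcount]
      simp only [List.countP_cons]
      have h0 : (fun q : Int × Int => q.1 == m) p0 = true := by simp [hp0fst]
      have h1 : (fun q : Int × Int => q.1 == m) p1 = false := by simp; omega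
      have h2 : List.countP (fun q : Int × Int => q.1 == m) rest = 0 := by
        rw [List.countP_eq_zero]
        intro z hz; simp; have := hrest z hz; omega
      simp [h0, h1, h2]
    rw [if_pos hne, hcnt1, if_pos rfl]
    -- index? gives some j with ds[j] = m, and j is p0.2
    obtain ⟨j, hj⟩ : ∃ j, PySem.List.index? ds m = some j := by
      rcases h : PySem.List.index? ds m with _ | j
      · rw [PySem.List.index?_eq_idxOf?] at h
        exact absurd hmmem (List.idxOf?_eq_none_iff.mp h)
      · exact ⟨j, rfl⟩
    obtain ⟨hjlt, hdsj, _⟩ := PySem.List.getElem_of_index?_eq_some hj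
    -- p0 = (ds[k], k) for some k
    obtain ⟨k, hk, hkp⟩ := List.mem_iff_getElem.mp hp0pairs
    rw [hget k (by omega)] at hkp
    have hdsk : ds[k]'(by omega) = m := by
      have := congrArg Prod.fst hkp; simpa [hp0fst] using this
    have hjlt' : j < coordinates.length := by omega
    have hpj : pairs[j]'(by omega) = (m, (j : Int)) := by
      rw [hget j hjlt']; exact congrArg (fun v => (v, (j : Int))) hdsj
    have hkj : k = j := by
      by_contra hkj
      have hcp1 : List.countP (fun q : Int × Int => q.1 == m) pairs = 1 := by
        rw [← hcountp]; exact hcnt1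
      have hfl1 : (pairs.filter (fun q : Int × Int => q.1 == m)).length = 1 := by
        rw [← List.countP_eq_length_filter]; exact hcp1
      obtain ⟨w, hw⟩ := List.length_eq_one_iff.mp hfl1
      have hmemk : pairs[k]'(by omega) ∈ pairs.filter (fun q : Int × Int => q.1 == m) := by
        rw [List.mem_filter]
        refine ⟨List.getElem_mem _, ?_⟩
        rw [hget k (by omega)]; simp [hdsk]
      have hmemj : pairs[j]'(by omega) ∈ pairs.filter (fun q : Int × Int => q.1 == m) := by
        rw [List.mem_filter]
        refine ⟨List.getElem_mem _, ?_⟩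
        rw [hget j hjlt']; simp [hdsj]
      rw [hw] at hmemk hmemj
      simp only [List.mem_singleton] at hmemk hmemj
      have heq : pairs[k]'(by omega) = pairs[j]'(by omega) := by rw [hmemk, hmemj]
      rw [hget k (by omega), hget j hjlt'] at heq
      have h2 := congrArg Prod.snd heq
      simp at h2
      omega
    have hp02 : p0.2 = (j : Int) := by
      rw [← hkp]; simp [hkj]
    rw [hj]
    simp only [hp02]
    rfl
  · -- tied minimum: both sides skip
    rw [not_ne_iff] at hne
    have hp1fst : p1.1 = m := by rw [← hne, hp0fst]
    have hcnt2 : PySem.List.count ds m ≠ 1 := by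
      rw [hcount]
      simp only [List.countP_cons]
      have h0 : (fun q : Int × Int => q.1 == m) p0 = true := by simp [hp0fst]
      have h1 : (fun q : Int × Int => q.1 == m) p1 = true := by simp [hp1fst]
      simp [h0, h1]
    rw [if_neg (by simpa using hne), if_neg hcnt2]
    rfl

-- a fold of ownStep splits into independent folds of the counts and the boundary-set component
lemma foldl_ownStep_split (x_min x_max y_min y_max : Int)
    (L : List (Int × Int × Option Int)) (d : PySem.Dict Int Int) (e : PySem.Set Int) :
    L.foldl (ownStep x_min x_max y_min y_max) (d, e)
    = (L.foldl (fun (d : PySem.Dict Int Int) t => match t.2.2 with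
        | some i => d.modify i 0 (· + 1)
        | none => d) d,
       L.foldl (fun e t => match boundaryOwner x_min x_max y_min y_max t with
        | some i => PySem.Set.add e i
        | none => e) e) := by
  induction L generalizing d e with
  | nil => rfl
  | cons t L ih =>
    rcases t with ⟨tx, ty, o⟩
    rcases o with _ | i
    · simp only [List.foldl_cons, ownStep, boundaryOwner]
      exact ih d e
    · by_cases hb : tx = x_min ∨ tx = x_max ∨ ty = y_min ∨ ty = y_max
      · simp only [List.foldl_cons, ownStep, boundaryOwner, if_pos hb]
        exact ih _ _
      · simp only [List.foldl_cons, ownStep, boundaryOwner, if_neg hb]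
        exact ih _ _

lemma counts_component (L : List (Int × Int × Option Int)) :
    L.foldl (fun (d : PySem.Dict Int Int) t => match t.2.2 with
        | some i => d.modify i 0 (· + 1)
        | none => d) PySem.Dict.empty
    = PySem.Dict.counter (L.filterMap (fun t => t.2.2)) := by
  rw [PySem.Dict.counter_eq_foldl, List.foldl_filterMap]
  apply PySem.List.foldl_congr_mem
  intro d t _
  cases t.2.2 <;> rfl

lemma set_component (x_min x_max y_min y_max : Int) (L : List (Int × Int × Option Int)) :
    L.foldl (fun e t => match boundaryOwner x_min x_max y_min y_max t with
        | some i => PySem.Set.add e i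
        | none => e) PySem.Set.empty
    = PySem.Set.ofList (L.filterMap (boundaryOwner x_min x_max y_min y_max)) := by
  rw [PySem.Set.ofList_eq_foldl, List.foldl_filterMap]
  have he : ([] : PySem.Set Int) = PySem.Set.empty := rfl
  rw [he]
  apply PySem.List.foldl_congr_mem
  intro e t _
  cases boundaryOwner x_min x_max y_min y_max t <;> rfl

-- erasing every key of a list from a dict keeps exactly the items whose key is not in the list
lemma items_foldl_erase (S : List Int) (d : PySem.Dict Int Int) :
    (S.foldl (fun d k => PySem.Dict.erase d k) d).items
    = d.items.filter (fun kv => !(S.contains kv.1)) := by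
  induction S generalizing d with
  | nil => simp
  | cons k S ih =>
    rw [List.foldl_cons, ih]
    have herase : (PySem.Dict.erase d k).items = d.items.filter (fun kv => !(kv.1 == k)) := rfl
    rw [herase, List.filter_filter]
    apply List.filter_congr
    intro a _
    by_cases h1 : a.1 = k <;> by_cases h2 : a.1 ∈ S <;> simp [h1, h2]

-- ===== VERDICT (by name: the statement is the Claim_ definition above) =====
theorem part_1_spec : Claim_equal_part_1 := by
  intro coordinates x_min x_max y_min y_max _ hpre
  unfold Spec_part_1
  simp only [part_1, part_1_alt]
  by_cases hlen : 2 ≤ coordinates.length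
  · have hcells : (PySem.List.pyRange y_min (y_max + 1) 1).foldl
        (fun s yy => (PySem.List.pyRange x_min (x_max + 1) 1).foldl
          (fun s' xx => part1Cell coordinates x_min x_max y_min y_max xx yy s') s)
        (PySem.Dict.empty, PySem.Set.empty)
        = ((PySem.List.pyRange y_min (y_max + 1) 1).flatMap (fun yy =>
            (PySem.List.pyRange x_min (x_max + 1) 1).map
              (fun xx => (xx, yy, nearestPt coordinates xx yy)))).foldl
          (ownStep x_min x_max y_min y_max) (PySem.Dict.empty, PySem.Set.empty) := by
      rw [List.foldl_flatMap]
      apply PySem.List.foldl_congr_mem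
      intro acc yy _
      rw [List.foldl_map]
      apply PySem.List.foldl_congr_mem
      intro acc' xx _
      exact cell_eq coordinates hlen x_min x_max y_min y_max xx yy acc'
    rw [hcells, foldl_ownStep_split, counts_component, set_component, items_foldl_erase]
    rfl
  · rcases hpre with h | h | h
    · omega
    · rw [PySem.List.pyRange_one_eq_nil (a := x_min) (b := x_max + 1) (by omega)]
      have hfm : (PySem.List.pyRange y_min (y_max + 1) 1).flatMap
          (fun _ => ([] : List (Int × Int × Option Int))) = [] := by simp
      simp only [List.foldl_nil, List.foldl_fixed, List.map_nil, hfm]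
      rfl
    · rw [PySem.List.pyRange_one_eq_nil (a := y_min) (b := y_max + 1) (by omega)]
      rfl
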